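-- pv_equiv track=rewrite | github.com/poojan124/Competitive | min_swap_to_sort.py | foo
-- ===== SOURCE A (Python) =====
-- def foo(l):
--
--     l = [x%2 for x in l]
--     p1 = 0
--     p2 = len(l) - 1
--     ans = 0
--     while p2 > p1:
--         while (p1 < len(l)) and (l[p1] != 1) :
--             p1 += 1
--         while (p2 >= 0) and (l[p2] != 0):
--             p2 -= 1
--         if p1 > p2:
--             break
--         ans += 1
--         l[p1] = 0
--         l[p2] = 1
--         p1 += 1
--         p2 -= 1
--
--     return ans
-- ===== SOURCE B (Python) =====
-- def foo(l):
--     k = sum(1 for x in l if x % 2 == 0)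
--     return sum(1 for x in l[:k] if x % 2 == 1)
-- ===== Notes on version B (the rewrite author's own statement) =====
-- stated objective: simpler
-- what changed: Replaced the mutating two-pointer swap simulation by a direct count: k = number of even elements, answer = number of odd elements among the first k positions.
import Mathlib
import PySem

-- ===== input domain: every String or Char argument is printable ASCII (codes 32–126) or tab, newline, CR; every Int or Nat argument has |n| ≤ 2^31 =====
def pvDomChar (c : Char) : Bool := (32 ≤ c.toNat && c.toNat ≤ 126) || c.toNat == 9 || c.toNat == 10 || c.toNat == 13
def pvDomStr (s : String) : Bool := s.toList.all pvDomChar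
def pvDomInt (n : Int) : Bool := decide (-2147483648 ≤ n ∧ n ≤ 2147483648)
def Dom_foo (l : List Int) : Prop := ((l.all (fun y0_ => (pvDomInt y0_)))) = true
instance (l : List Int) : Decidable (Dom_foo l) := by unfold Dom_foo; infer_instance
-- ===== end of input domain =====

-- B replaces A's two-pointer swap simulation by counting the odd entries in the
-- first k positions, where k is the number of even entries (objective: simpler).

-- ===== PORT A =====
-- inner while: `while (p1 < len(l)) and (l[p1] != 1): p1 += 1`
def fooScanOdd (b : List Int) (p1 : Int) : Int :=
  if p1 < (b.length : Int) ∧ PySem.List.pyGet? b p1 ≠ some 1 then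
    fooScanOdd b (p1 + 1)
  else p1
termination_by ((b.length : Int) - p1).toNat
decreasing_by omega

-- inner while: `while (p2 >= 0) and (l[p2] != 0): p2 -= 1`
def fooScanEven (b : List Int) (p2 : Int) : Int :=
  if 0 ≤ p2 ∧ PySem.List.pyGet? b p2 ≠ some 0 then
    fooScanEven b (p2 - 1)
  else p2
termination_by (p2 + 1).toNat
decreasing_by omega

theorem fooScanOdd_ge (b : List Int) (p1 : Int) : p1 ≤ fooScanOdd b p1 := by
  fun_induction fooScanOdd b p1 with
  | case1 p1 h ih => omega
  | case2 p1 h => omega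

theorem fooScanEven_le (b : List Int) (p2 : Int) : fooScanEven b p2 ≤ p2 := by
  fun_induction fooScanEven b p2 with
  | case1 p2 h ih => omega
  | case2 p2 h => omega

-- outer `while p2 > p1` loop; `l[p1] = 0` / `l[p2] = 1` become List.set at the
-- (always in-range, nonnegative) indices, exact for the reachable states
def fooLoop (b : List Int) (p1 p2 ans : Int) : Int :=
  if h : p2 > p1 then
    let q1 := fooScanOdd b p1
    let q2 := fooScanEven b p2
    if q1 > q2 then ans
    else fooLoop ((b.set q1.toNat 0).set q2.toNat 1) (q1 + 1) (q2 - 1) (ans + 1)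
  else ans
termination_by (p2 - p1).toNat
decreasing_by
  have h1 := fooScanOdd_ge b p1
  have h2 := fooScanEven_le b p2
  omega

def foo (l : List Int) : Int :=
  let b := l.map (fun x => PySem.Int.mod x 2)
  fooLoop b 0 ((b.length : Int) - 1) 0

-- ===== PORT B =====
def foo_alt (l : List Int) : Int :=
  let k : Int := l.foldl (fun acc x => if PySem.Int.mod x 2 == 0 then acc + 1 else acc) 0
  (PySem.List.slice l none (some k)).foldl
    (fun acc x => if PySem.Int.mod x 2 == 1 then acc + 1 else acc) 0

-- ===== PRECONDITION & SPEC =====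
def Spec_foo (l : List Int) (out : Int) : Prop := out = foo_alt l
instance (l : List Int) (out : Int) : Decidable (Spec_foo l out) := by unfold Spec_foo; infer_instance

-- ===== CLAIM (what is proved, stated in full; the proofs are below) =====
def Claim_equal_foo : Prop := ∀ (l : List Int), Dom_foo l → Spec_foo l (foo l)

-- ===== LEMMAS AND PROOFS =====

-- the number of zeros of the 0/1 list, and the number of ones among its first count0 entries
def fooCount0 (b : List Int) : Nat := b.countP (· == 0)
def fooG (b : List Int) : Int := ((b.take (fooCount0 b)).countP (· == 1) : Int)

def fooBits (b : List Int) : Prop := ∀ x ∈ b, x = 0 ∨ x = 1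

theorem fooScanOdd_le_len (b : List Int) (p1 : Int) (h : p1 ≤ (b.length : Int)) :
    fooScanOdd b p1 ≤ (b.length : Int) := by
  fun_induction fooScanOdd b p1 with
  | case1 p1 h ih => exact ih (by omega)
  | case2 p1 h => omega

theorem fooScanOdd_mid (b : List Int) (p1 : Int) :
    ∀ i : Nat, p1 ≤ (i : Int) → (i : Int) < fooScanOdd b p1 →
      PySem.List.pyGet? b (i : Int) ≠ some 1 := by
  fun_induction fooScanOdd b p1 with
  | case1 p1 h ih =>
    intro i hi hilt
    rcases eq_or_lt_of_le hi with heq | hlt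
    · rw [← heq]; exact h.2
    · exact ih i (by omega) hilt
  | case2 p1 h =>
    intro i hi hilt; omega

theorem fooScanOdd_stop (b : List Int) (p1 : Int)
    (h : fooScanOdd b p1 < (b.length : Int)) :
    PySem.List.pyGet? b (fooScanOdd b p1) = some 1 := by
  fun_induction fooScanOdd b p1 with
  | case1 p1 h ih => exact ih ‹_›
  | case2 p1 hc =>
    by_contra hne
    exact hc ⟨h, hne⟩

theorem fooScanEven_ge (b : List Int) (p2 : Int) (h : -1 ≤ p2) :
    -1 ≤ fooScanEven b p2 := by
  fun_induction fooScanEven b p2 with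
  | case1 p2 h ih => exact ih (by omega)
  | case2 p2 h => omega

theorem fooScanEven_mid (b : List Int) (p2 : Int) :
    ∀ i : Nat, fooScanEven b p2 < (i : Int) → (i : Int) ≤ p2 →
      PySem.List.pyGet? b (i : Int) ≠ some 0 := by
  fun_induction fooScanEven b p2 with
  | case1 p2 h ih =>
    intro i hgt hle
    rcases eq_or_lt_of_le hle with heq | hlt
    · rw [heq]; exact h.2
    · exact ih i hgt (by omega)
  | case2 p2 h =>
    intro i hgt hle; omega

theorem fooScanEven_stop (b : List Int) (p2 : Int)
    (h : 0 ≤ fooScanEven b p2) :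
    PySem.List.pyGet? b (fooScanEven b p2) = some 0 := by
  fun_induction fooScanEven b p2 with
  | case1 p2 h ih => exact ih ‹_›
  | case2 p2 hc =>
    by_contra hne
    exact hc ⟨h, hne⟩

-- a 0/1 list that is all zeros up to k and all ones after has fooG = 0
theorem fooG_zero_of_split (b : List Int) (k : Nat) (hk : k ≤ b.length)
    (hz : ∀ i : Nat, i < k → b[i]? = some 0)
    (ho : ∀ i : Nat, k ≤ i → i < b.length → b[i]? = some 1) :
    fooG b = 0 := by
  have hb : b = List.replicate k 0 ++ List.replicate (b.length - k) 1 := by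
    apply List.ext_getElem?
    intro i
    by_cases hik : i < k
    · rw [hz i hik]
      rw [List.getElem?_append_left (by simp; omega)]
      simp [hik]
    · by_cases hil : i < b.length
      · rw [ho i (by omega) hil]
        rw [List.getElem?_append_right (by simp; omega)]
        simp [List.getElem?_replicate]
        omega
      · rw [List.getElem?_eq_none (by omega), List.getElem?_eq_none (by simp; omega)]
  have hc0 : fooCount0 b = k := by
    rw [fooCount0, hb, List.countP_append]
    simp [List.countP_replicate]
  unfold fooG
  rw [hc0, hb, List.take_append_of_le_length (by simp)]
  simp [List.countP_replicate]


-- counting after a single in-range set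
theorem fooCountP_set (p : Int → Bool) (l : List Int) (i : Nat) (a : Int) (h : i < l.length) :
    List.countP p (l.set i a) + (if p l[i] then 1 else 0)
      = List.countP p l + (if p a then 1 else 0) := by
  have hsplit : List.countP p l
      = List.countP p (l.take i) + ((if p l[i] then 1 else 0) + List.countP p (l.drop (i + 1))) := by
    conv_lhs => rw [← List.take_append_drop i l, List.drop_eq_getElem_cons h]
    rw [List.countP_append, List.countP_cons]
    split_ifs <;> omega
  have hset : List.countP p (l.set i a)
      = List.countP p (l.take i) + ((if p a then 1 else 0) + List.countP p (l.drop (i + 1))) := by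
    rw [List.set_eq_take_append_cons_drop, if_pos h, List.countP_append, List.countP_cons]
    split_ifs <;> omega
  rw [hsplit, hset]
  split_ifs <;> omega

theorem fooSwap_count0 (b : List Int) (i j : Nat) (hij : i < j) (hjl : j < b.length)
    (hi : b[i]? = some 1) (hj : b[j]? = some 0) :
    fooCount0 ((b.set i 0).set j 1) = fooCount0 b := by
  have hil : i < b.length := by omega
  have hbi : b[i] = 1 := by rw [List.getElem?_eq_getElem hil] at hi; simpa using hi
  have hbj : b[j] = 0 := by rw [List.getElem?_eq_getElem hjl] at hj; simpa using hj
  have h1 := fooCountP_set (· == 0) b i 0 hil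
  have hjl' : j < (b.set i 0).length := by simpa using hjl
  have h2 := fooCountP_set (· == 0) (b.set i 0) j 1 hjl'
  have hw : (b.set i 0)[j] = b[j] := List.getElem_set_ne (by omega) hjl'
  rw [hw, hbj] at h2
  rw [hbi] at h1
  simp only [fooCount0]
  simp at h1 h2
  omega

-- first-k prefix: take i b is all zeros hence replicate
theorem fooTake_replicate (b : List Int) (i : Nat)
    (hz : ∀ t : Nat, t < i → b[t]? = some 0) :
    b.take i = List.replicate i 0 := by
  apply List.ext_getElem?
  intro t
  by_cases ht : t < i
  · rw [List.getElem?_take_of_lt ht, hz t ht, List.getElem?_replicate, if_pos ht]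
  · rw [List.getElem?_eq_none (by simp; omega), List.getElem?_eq_none (by simp; omega)]

theorem fooCount0_bounds (b : List Int) (i j : Nat) (hij : i < j) (hjl : j < b.length)
    (hz : ∀ t : Nat, t < i → b[t]? = some 0)
    (hi : b[i]? = some 1) (hj : b[j]? = some 0)
    (ho : ∀ t : Nat, j < t → t < b.length → b[t]? = some 1) :
    i < fooCount0 b ∧ fooCount0 b ≤ j := by
  have hil : i < b.length := by omega
  have hbi : b[i] = 1 := by rw [List.getElem?_eq_getElem hil] at hi; simpa using hi
  have htake : b.take i = List.replicate i 0 := fooTake_replicate b i hz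
  constructor
  · -- lower bound
    have hsplit : fooCount0 b
        = List.countP (· == 0) (b.take i) + List.countP (· == 0) (b.drop i) := by
      rw [fooCount0, ← List.countP_append, List.take_append_drop]
    have hdrop : b.drop i = b[i] :: b.drop (i + 1) := List.drop_eq_getElem_cons hil
    have hmem : (0 : Int) ∈ b.drop (i + 1) := by
      rw [List.mem_iff_getElem?]
      exact ⟨j - (i + 1), by rw [List.getElem?_drop]; rw [← hj]; congr 1; omega⟩
    have hpos : 0 < List.countP (· == 0) (b.drop (i + 1)) := by
      rw [List.countP_pos_iff]
      exact ⟨0, hmem, by simp⟩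
    rw [hsplit, htake, hdrop, hbi]
    simp [List.countP_replicate]
    omega
  · -- upper bound
    have hsplit : fooCount0 b
        = List.countP (· == 0) (b.take (j + 1)) + List.countP (· == 0) (b.drop (j + 1)) := by
      rw [fooCount0, ← List.countP_append, List.take_append_drop]
    have hdropzero : List.countP (· == 0) (b.drop (j + 1)) = 0 := by
      rw [List.countP_eq_zero]
      intro x hx
      rw [List.mem_iff_getElem?] at hx
      obtain ⟨t, ht⟩ := hx
      rw [List.getElem?_drop] at ht
      have htl : j + 1 + t < b.length := by
        by_contra hc
        rw [List.getElem?_eq_none (by omega)] at ht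
        exact absurd ht (by simp)
      have := ho (j + 1 + t) (by omega) htl
      rw [this] at ht
      simp at ht
      simp [← ht]
    have htakedec : b.take (j + 1)
        = b.take i ++ (b[i] :: List.take (j - i) (b.drop (i + 1))) := by
      conv_lhs => rw [← List.take_append_drop i (b.take (j + 1))]
      rw [List.take_take, Nat.min_eq_left (by omega), List.drop_take,
        List.drop_eq_getElem_cons hil, show j + 1 - i = (j - i) + 1 from by omega,
        List.take_succ_cons]
    have hlen : List.countP (· == 0) (List.take (j - i) (b.drop (i + 1))) ≤ j - i :=
      le_trans List.countP_le_length (by simp)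
    have e1 : List.countP (· == 0) (b.take (j + 1))
        = List.countP (· == 0) (b.take i)
          + List.countP (· == 0) (b[i] :: List.take (j - i) (b.drop (i + 1))) := by
      rw [htakedec, List.countP_append]
    have e2 : List.countP (· == 0) (b[i] :: List.take (j - i) (b.drop (i + 1)))
        = List.countP (· == 0) (List.take (j - i) (b.drop (i + 1))) := by
      rw [List.countP_cons, hbi]; norm_num
    have e3 : List.countP (· == 0) (b.take i) = i := by
      rw [htake, List.countP_replicate]; norm_num
    omega

theorem fooSwap_g (b : List Int) (i j : Nat) (hij : i < j) (hjl : j < b.length)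
    (hik : i < fooCount0 b) (hkj : fooCount0 b ≤ j)
    (hi : b[i]? = some 1) (hj : b[j]? = some 0) :
    fooG ((b.set i 0).set j 1) + 1 = fooG b := by
  have hil : i < b.length := by omega
  have hbi : b[i] = 1 := by rw [List.getElem?_eq_getElem hil] at hi; simpa using hi
  set k := fooCount0 b with hk
  have hc : fooCount0 ((b.set i 0).set j 1) = k := fooSwap_count0 b i j hij hjl hi hj
  have htk : ((b.set i 0).set j 1).take k = (b.take k).set i 0 := by
    rw [List.take_set]
    rw [List.set_eq_of_length_le (by simp; omega)]
    rw [List.take_set]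
  have hitk : i < (b.take k).length := by simp; omega
  have hgi : (b.take k)[i] = b[i] := List.getElem_take ..
  have hcs := fooCountP_set (· == 1) (b.take k) i 0 hitk
  rw [hgi, hbi] at hcs
  norm_num at hcs
  unfold fooG
  rw [hc, htk, ← hk]
  omega

-- main invariant lemma for A's outer loop
theorem fooLoop_eq (n : Nat) : ∀ (b : List Int) (p1 p2 ans : Int),
    (p2 - p1).toNat ≤ n →
    fooBits b → 0 ≤ p1 → p1 ≤ (b.length : Int) → p2 < (b.length : Int) →
    (∀ i : Nat, (i : Int) < p1 → b[i]? = some 0) →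
    (∀ i : Nat, p2 < (i : Int) → i < b.length → b[i]? = some 1) →
    fooLoop b p1 p2 ans = ans + fooG b := by
  induction n using Nat.strong_induction_on with
  | _ n ih =>
  intro b p1 p2 ans hn hb h1 h1l h2 hz ho
  have hbit : ∀ i : Nat, i < b.length → b[i]? = some 0 ∨ b[i]? = some 1 := by
    intro i hilen
    have hm : b[i] ∈ b := List.getElem_mem hilen
    rcases hb _ hm with h | h <;>
      [left; right] <;> rw [List.getElem?_eq_getElem hilen, h]
  by_cases hcond : p2 > p1
  · rw [fooLoop, dif_pos hcond]
    set q1 := fooScanOdd b p1 with hq1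
    set q2 := fooScanEven b p2 with hq2
    have hq1ge : p1 ≤ q1 := fooScanOdd_ge b p1
    have hq1le : q1 ≤ (b.length : Int) := fooScanOdd_le_len b p1 h1l
    have hq2le : q2 ≤ p2 := fooScanEven_le b p2
    have hq2ge : -1 ≤ q2 := fooScanEven_ge b p2 (by omega)
    -- extended zero/one prefixes
    have hz' : ∀ i : Nat, (i : Int) < q1 → b[i]? = some 0 := by
      intro i hiq
      by_cases hip : (i : Int) < p1
      · exact hz i hip
      · have hne := fooScanOdd_mid b p1 i (by omega) hiq
        rw [PySem.List.pyGet?_natCast] at hne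
        rcases hbit i (by omega) with h | h
        · exact h
        · exact absurd h hne
    have ho' : ∀ i : Nat, q2 < (i : Int) → i < b.length → b[i]? = some 1 := by
      intro i hiq hilen
      by_cases hip : p2 < (i : Int)
      · exact ho i hip hilen
      · have hne := fooScanEven_mid b p2 i hiq (by omega)
        rw [PySem.List.pyGet?_natCast] at hne
        rcases hbit i hilen with h | h
        · exact absurd h hne
        · exact h
    by_cases hbreak : q1 > q2
    · rw [if_pos hbreak]
      have hg : fooG b = 0 := by
        apply fooG_zero_of_split b q1.toNat (by omega)
        · intro i hi
          exact hz' i (by omega)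
        · intro i hi hilen
          exact ho' i (by omega) hilen
      rw [hg]; ring
    · rw [if_neg hbreak]
      have hq1lt : q1 < (b.length : Int) := by omega
      have hq2pos : 0 ≤ q2 := by omega
      have hs1 := fooScanOdd_stop b p1 hq1lt
      have hs2 := fooScanEven_stop b p2 hq2pos
      rw [← hq1] at hs1; rw [← hq2] at hs2
      have hq1n : PySem.List.pyGet? b q1 = b[q1.toNat]? := by
        rw [← PySem.List.pyGet?_natCast (n := q1.toNat)]
        congr 1; omega
      have hq2n : PySem.List.pyGet? b q2 = b[q2.toNat]? := by
        rw [← PySem.List.pyGet?_natCast (n := q2.toNat)]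
        congr 1; omega
      rw [hq1n] at hs1; rw [hq2n] at hs2
      have hq12 : q1.toNat < q2.toNat := by
        rcases lt_or_eq_of_le (le_of_not_gt hbreak) with h | h
        · omega
        · exfalso; rw [h] at hs1; rw [hs1] at hs2; exact absurd hs2 (by simp)
      have hbounds := fooCount0_bounds b q1.toNat q2.toNat hq12 (by omega)
        (fun t ht => hz' t (by omega)) hs1 hs2
        (fun t ht htl => ho' t (by omega) htl)
      set b' := (b.set q1.toNat 0).set q2.toNat 1 with hb'
      have hlen' : b'.length = b.length := by simp [hb']
      have hrec := ih (n - 1) (by omega) b' (q1 + 1) (q2 - 1) (ans + 1)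
        (by omega)
        (by
          intro x hx
          rcases List.mem_or_eq_of_mem_set hx with hx' | hx'
          · rcases List.mem_or_eq_of_mem_set hx' with hx'' | hx''
            · exact hb x hx''
            · left; exact hx''
          · right; exact hx')
        (by omega) (by omega) (by omega)
        (by
          intro i hi
          by_cases hiq : (i : Int) < q1
          · have : b[i]? = some 0 := hz' i hiq
            rw [hb', List.getElem?_set, if_neg (by omega),
              List.getElem?_set, if_neg (by omega)]
            exact this
          · have hieq : i = q1.toNat := by omega
            rw [hb', List.getElem?_set, if_neg (by omega),
              List.getElem?_set, if_pos (by omega), if_pos (by omega)])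
        (by
          intro i hi hilen
          rw [hlen'] at hilen
          by_cases hiq : q2 < (i : Int)
          · have : b[i]? = some 1 := ho' i hiq hilen
            rw [hb', List.getElem?_set, if_neg (by omega),
              List.getElem?_set, if_neg (by omega)]
            exact this
          · have hieq : i = q2.toNat := by omega
            rw [hb', List.getElem?_set, if_pos (by omega), if_pos (by simp; omega)])
      rw [hrec]
      have hswap := fooSwap_g b q1.toNat q2.toNat hq12 (by omega)
        hbounds.1 hbounds.2 hs1 hs2
      rw [← hb'] at hswap
      omega
  · rw [fooLoop, dif_neg hcond]
    have hg : fooG b = 0 := by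
      by_cases hplen : p1 < (b.length : Int)
      · rcases hbit p1.toNat (by omega) with h | h
        · apply fooG_zero_of_split b (p1.toNat + 1) (by omega)
          · intro i hi
            by_cases hip : (i : Int) < p1
            · exact hz i hip
            · have : i = p1.toNat := by omega
              rw [this]; exact h
          · intro i hi hilen
            exact ho i (by omega) hilen
        · apply fooG_zero_of_split b p1.toNat (by omega)
          · intro i hi
            exact hz i (by omega)
          · intro i hi hilen
            by_cases hip : p2 < (i : Int)
            · exact ho i hip hilen
            · have : i = p1.toNat := by omega
              rw [this]; exact h
      · apply fooG_zero_of_split b b.length (le_refl _)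
        · intro i hi
          exact hz i (by omega)
        · intro i hi hilen
          omega
    rw [hg]; ring

theorem fooBits_map (l : List Int) :
    fooBits (l.map (fun x => PySem.Int.mod x 2)) := by
  intro x hx
  rw [List.mem_map] at hx
  obtain ⟨y, _, hy⟩ := hx
  have h1 := PySem.Int.mod_nonneg y (b := 2) (by omega)
  have h2 := PySem.Int.mod_lt y (b := 2) (by omega)
  omega

theorem foo_eq_g (l : List Int) :
    foo l = fooG (l.map (fun x => PySem.Int.mod x 2)) := by
  unfold foo
  have := fooLoop_eq ((((l.map (fun x => PySem.Int.mod x 2)).length : Int) - 1 - 0).toNat)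
    (l.map (fun x => PySem.Int.mod x 2)) 0
    (((l.map (fun x => PySem.Int.mod x 2)).length : Int) - 1) 0
    (le_refl _) (fooBits_map l) (by omega) (by simp) (by omega)
    (by intro i hi; omega)
    (by intro i hi hilen; omega)
  rw [this]; ring

theorem foo_alt_eq_g (l : List Int) :
    foo_alt l = fooG (l.map (fun x => PySem.Int.mod x 2)) := by
  unfold foo_alt
  rw [PySem.List.foldl_if_add_one, PySem.List.foldl_if_add_one]
  simp only [zero_add]
  rw [PySem.List.slice_to_natCast]
  unfold fooG fooCount0
  rw [List.countP_map, ← List.map_take, List.countP_map]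
  rfl

-- ===== VERDICT (by name: the statement is the Claim_ definition above) =====
theorem foo_spec : Claim_equal_foo := by
  intro l _
  unfold Spec_foo
  rw [foo_eq_g, foo_alt_eq_g]
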